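-- pv_equiv track=rewrite | github.com/Nikhil-Singla/the-daily-grind | leetcode/python/02_medium/Weekly_0459.py | checkDivisibility
-- ===== SOURCE A (Python) =====
-- def checkDivisibility(n: int) -> bool:
--     digits = []
--     temp = n
--     while temp > 0:
--         digits.append(int(temp%10))
--         temp = int(temp / 10)
--     prod = 1
--     for x in digits:
--         prod *= x
--
--     sumD = sum(digits)
--     return (n % (sumD+prod) == 0)
-- ===== SOURCE B (Python) =====
-- def checkDivisibility(n: int) -> bool:
--     ds = [int(c) for c in str(n)] if n > 0 else []
--     prod = 1
--     for d in ds: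
--         prod *= d
--     return n % (sum(ds) + prod) == 0
-- ===== Notes on version B (the rewrite author's own statement) =====
-- stated objective: alternative
-- what changed: B obtains the digits from the decimal string representation str(n) instead of peeling them arithmetically with repeated remainder/quotient steps as A does.
import Mathlib
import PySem

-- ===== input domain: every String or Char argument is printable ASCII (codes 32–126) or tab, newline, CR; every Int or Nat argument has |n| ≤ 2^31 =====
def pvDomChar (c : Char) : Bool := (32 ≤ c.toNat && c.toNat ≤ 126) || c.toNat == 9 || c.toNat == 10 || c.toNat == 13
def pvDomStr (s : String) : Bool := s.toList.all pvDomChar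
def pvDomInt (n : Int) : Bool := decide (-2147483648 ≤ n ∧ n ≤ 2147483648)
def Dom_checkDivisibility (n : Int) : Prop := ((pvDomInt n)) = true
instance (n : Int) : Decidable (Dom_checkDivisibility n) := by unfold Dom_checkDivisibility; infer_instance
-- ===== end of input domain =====

-- B reads the digits off the decimal string str(n) instead of peeling them arithmetically; return value only.

-- ===== PORT A =====
-- the while loop building `digits` (cons order matches append order of the Python loop);
-- int(temp / 10) is ported as PySem.Int.truncdiv (exact for |temp| < 2^53, which Dom guarantees)
def pvDigitsA (temp : Int) : List Int :=
  if temp > 0 then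
    PySem.Int.mod temp 10 :: pvDigitsA (PySem.Int.truncdiv temp 10)
  else []
termination_by temp.toNat
decreasing_by simp only [PySem.Int.truncdiv]; rw [Int.tdiv_eq_ediv_of_nonneg (by omega)]; omega

def checkDivisibility (n : Int) : Bool :=
  let digits := pvDigitsA n
  let prod := digits.foldl (· * ·) 1
  let sumD := digits.sum
  decide (PySem.Int.mod n (sumD + prod) = 0)

-- ===== PORT B =====
-- [int(c) for c in str(n)]: str(n) is PySem.Int.toChars n; int(c) on the digit chars str(n) of a
-- positive n consists of is exactly (c.toNat : Int) - 48
def checkDivisibility_alt (n : Int) : Bool :=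
  let ds : List Int := if n > 0 then (PySem.Int.toChars n).map (fun c => (c.toNat : Int) - 48) else []
  let prod := ds.foldl (· * ·) 1
  decide (PySem.Int.mod n (ds.sum + prod) = 0)

-- ===== PRECONDITION & SPEC =====
def Spec_checkDivisibility (n : Int) (out : Bool) : Prop := out = checkDivisibility_alt n
instance (n : Int) (out : Bool) : Decidable (Spec_checkDivisibility n out) := by unfold Spec_checkDivisibility; infer_instance

-- ===== CLAIM (what is proved, stated in full; the proofs are below) =====
def Claim_equal_checkDivisibility : Prop := ∀ (n : Int), Dom_checkDivisibility n → Spec_checkDivisibility n (checkDivisibility n)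

-- ===== LEMMAS AND PROOFS =====

-- Nat.toDigitsCore (what Nat.toDigits unfolds to) produces the decimal digits, most significant first
theorem pvToDigitsCore_eq (f : Nat) : ∀ (n : Nat) (acc : List Char), 0 < n → n < f →
    Nat.toDigitsCore 10 f n acc = ((Nat.digits 10 n).map Nat.digitChar).reverse ++ acc := by
  induction f with
  | zero => intro n acc h0 hf; omega
  | succ f ih =>
    intro n acc h0 hf
    rw [Nat.toDigitsCore]
    rw [Nat.digits_def' (by norm_num : (1:Nat) < 10) h0]
    by_cases hd : n / 10 = 0
    · have : n % 10 = n := Nat.mod_eq_of_lt (by omega)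
      simp [hd, this]
    · rw [if_neg hd, ih (n / 10) _ (by omega) (by omega)]
      simp

-- A's digit list is the little-endian decimal digit list of n
theorem pvDigitsA_eq (m : Nat) : pvDigitsA (m : Int) = (Nat.digits 10 m).map (Nat.cast : ℕ → ℤ) := by
  induction m using Nat.strong_induction_on with
  | _ m ih =>
    rw [pvDigitsA]
    by_cases h0 : 0 < m
    · rw [if_pos (by exact_mod_cast h0)]
      rw [Nat.digits_def' (by norm_num : (1:Nat) < 10) h0]
      have hdiv : PySem.Int.truncdiv (m : Int) 10 = ((m / 10 : Nat) : Int) := by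
        simp only [PySem.Int.truncdiv]
        rw [Int.tdiv_eq_ediv_of_nonneg (by positivity)]
        exact_mod_cast (Int.natCast_div m 10).symm
      rw [hdiv, ih (m / 10) (by omega)]
      simp
    · rw [if_neg (by exact_mod_cast h0)]
      have : m = 0 := by omega
      simp [this]

-- int(c) recovers d from the digit character of d < 10
theorem pvDigitChar_int (d : Nat) (h : d < 10) : ((Nat.digitChar d).toNat : Int) - 48 = (d : Int) := by
  interval_cases d <;> rfl

-- for n > 0, B's digit list is the reverse of A's
theorem pvDs_eq_reverse (n : Int) (h : 0 < n) :
    (PySem.Int.toChars n).map (fun c => (c.toNat : Int) - 48) = (pvDigitsA n).reverse := by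
  have hn : n = (n.toNat : Int) := by omega
  rw [hn, pvDigitsA_eq]
  simp only [PySem.Int.toChars, Int.toNat_natCast]
  rw [if_neg (by omega), Nat.toDigits,
      pvToDigitsCore_eq (n.toNat + 1) n.toNat [] (by omega) (by omega)]
  simp only [List.append_nil, ← List.map_reverse, List.map_map]
  refine List.map_congr_left ?_
  intro d hd
  have : d < 10 := Nat.digits_lt_base (by norm_num) (List.mem_reverse.mp hd)
  simpa using pvDigitChar_int d this

-- ===== VERDICT (by name: the statement is the Claim_ definition above) =====
theorem checkDivisibility_spec : Claim_equal_checkDivisibility := by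
  intro n _
  unfold Spec_checkDivisibility checkDivisibility checkDivisibility_alt
  by_cases h : 0 < n
  · simp only [if_pos (by exact_mod_cast h), pvDs_eq_reverse n h]
    rw [List.sum_reverse, ← List.prod_eq_foldl, ← List.prod_eq_foldl, List.prod_reverse]
  · simp only [if_neg (by exact_mod_cast h)]
    rw [pvDigitsA, if_neg (by exact_mod_cast h)]
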